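-- pv_equiv track=rewrite | github.com/zaidaslam99/Encrypted_Message_Project | Encrypted_Message_Project.py | get_letter_list
-- ===== SOURCE A (Python) =====
-- def get_letter_list(list_containing_text):
--
--     list_of_words = []
--     list_of_each_letter = []
--
--     for each_line in list_containing_text:
--         for each_word in each_line.split():
--             list_of_words.append(each_word)
--
--     for each_word in list_of_words:
--         for each_letter in each_word:
--             list_of_each_letter.append(each_letter)
--
--     return list_of_each_letter
-- ===== SOURCE B (Python) =====
-- def get_letter_list(list_containing_text):
--     # single pass: keep every non-whitespace character, in order
--     list_of_each_letter = []
--     for each_line in list_containing_text: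
--         for each_char in each_line:
--             if each_char.isspace():
--                 continue
--             list_of_each_letter.append(each_char)
--     return list_of_each_letter
-- ===== Notes on version B (the rewrite author's own statement) =====
-- stated objective: simpler
-- what changed: Replaces the two-phase split-into-words-then-flatten-letters with a single character-filtering pass that keeps every non-whitespace character, dropping the intermediate word list and the split() call.
import Mathlib
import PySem

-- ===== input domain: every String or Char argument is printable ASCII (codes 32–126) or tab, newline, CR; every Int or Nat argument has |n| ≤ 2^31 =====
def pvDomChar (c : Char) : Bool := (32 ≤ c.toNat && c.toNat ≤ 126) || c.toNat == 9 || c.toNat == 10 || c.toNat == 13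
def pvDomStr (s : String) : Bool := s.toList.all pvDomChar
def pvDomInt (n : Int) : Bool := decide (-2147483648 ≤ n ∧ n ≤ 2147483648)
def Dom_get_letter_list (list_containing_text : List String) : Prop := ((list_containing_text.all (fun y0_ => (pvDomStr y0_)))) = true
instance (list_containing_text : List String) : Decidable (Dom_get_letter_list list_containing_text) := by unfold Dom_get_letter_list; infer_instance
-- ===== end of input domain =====

-- B is a single character-filtering pass (keep every non-whitespace character); A builds a word list via split() first. Objective: simpler.

-- ===== PORT A =====
def get_letter_list (list_containing_text : List String) : List String :=
  let list_of_words :=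
    list_containing_text.foldl
      (fun acc each_line =>
        (PySem.Str.split₀ each_line).foldl (fun a each_word => a ++ [each_word]) acc) []
  list_of_words.foldl
    (fun acc each_word =>
      each_word.toList.foldl (fun a each_letter => a ++ [String.ofList [each_letter]]) acc) []

-- ===== PORT B =====
def get_letter_list_alt (list_containing_text : List String) : List String :=
  list_containing_text.foldl
    (fun acc each_line =>
      each_line.toList.foldl
        (fun a each_char =>
          if PySem.Chars.isspace each_char then a else a ++ [String.ofList [each_char]]) acc) []

-- ===== PRECONDITION & SPEC =====
def Spec_get_letter_list (list_containing_text : List String) (out : List String) : Prop := out = get_letter_list_alt list_containing_text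
instance (list_containing_text : List String) (out : List String) : Decidable (Spec_get_letter_list list_containing_text out) := by unfold Spec_get_letter_list; infer_instance

-- ===== CLAIM (what is proved, stated in full; the proofs are below) =====
def Claim_equal_get_letter_list : Prop := ∀ (list_containing_text : List String), Dom_get_letter_list list_containing_text → Spec_get_letter_list list_containing_text (get_letter_list list_containing_text)

-- ===== LEMMAS AND PROOFS =====

-- flatten of split₀.go: the words' characters are exactly the non-whitespace characters, in order
theorem split0_go_flatten (rest : List Char) :
    ∀ (cur : List Char) (acc : List (List Char)),
      (PySem.Chars.split₀.go rest cur acc).flatten =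
        acc.reverse.flatten ++ cur.reverse ++ rest.filter (fun c => !PySem.Chars.isspace c) := by
  induction rest with
  | nil =>
      intro cur acc
      simp only [PySem.Chars.split₀.go]
      by_cases h : cur.isEmpty
      · simp [List.isEmpty_iff.mp h]
      · simp [h]
  | cons c rest ih =>
      intro cur acc
      simp only [PySem.Chars.split₀.go]
      by_cases hs : PySem.Chars.isspace c
      · by_cases h : cur.isEmpty
        · simp [hs, ih, List.isEmpty_iff.mp h]
        · simp [hs, h, ih]
      · simp [hs, ih]

theorem split0_flatten (cs : List Char) :
    (PySem.Chars.split₀ cs).flatten = cs.filter (fun c => !PySem.Chars.isspace c) := by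
  simpa using split0_go_flatten cs [] []

-- B's inner loop: skip-whitespace-else-append is append-if-kept
theorem foldl_skip_if (l : List Char) (acc : List String) :
    l.foldl (fun a c => if PySem.Chars.isspace c then a else a ++ [String.ofList [c]]) acc
      = acc ++ (l.filter (fun c => !PySem.Chars.isspace c)).map (fun c => String.ofList [c]) := by
  rw [show (fun (a : List String) c => if PySem.Chars.isspace c then a else a ++ [String.ofList [c]])
        = (fun a c => if (!PySem.Chars.isspace c) = true then a ++ [String.ofList [c]] else a) from by
        funext a c; by_cases h : PySem.Chars.isspace c <;> simp [h]]
  exact PySem.List.foldl_append_if _ _ l acc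

-- per line: characters of the split words = non-whitespace characters
theorem line_eq (s : String) :
    (PySem.Str.split₀ s).flatMap (fun w => w.toList.map (fun c => String.ofList [c]))
      = (s.toList.filter (fun c => !PySem.Chars.isspace c)).map (fun c => String.ofList [c]) := by
  rw [← split0_flatten, ← PySem.Str.split₀_map_toList, List.map_flatten, List.map_map,
    List.flatMap_def]
  rfl

-- ===== VERDICT (by name: the statement is the Claim_ definition above) =====
theorem get_letter_list_spec : Claim_equal_get_letter_list := by
  intro xs _
  unfold Spec_get_letter_list get_letter_list get_letter_list_alt
  simp only [PySem.List.foldl_append_singleton, PySem.List.foldl_append_singleton_eq_map,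
    PySem.List.foldl_append_eq_flatMap, foldl_skip_if, List.nil_append]
  rw [List.flatMap_assoc]
  congr 1
  funext s
  exact line_eq s
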